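-- pv_equiv track=rewrite | github.com/peterpei666/leetcode_python | 3886. Sum of Sortable Integers.py | sortableIntegers
-- ===== SOURCE A (Python) =====
-- def sortableIntegers(nums: list[int]) -> int:
--     n = len(nums)
--     sorted_nums = sorted(nums)
--
--     def check(k: int) -> bool:
--         for i in range(0, n, k):
--             block = nums[i : i + k]
--             target = sorted_nums[i : i + k]
--             if sorted(block) != target:
--                 return False
--             cnt = 0
--             for j in range(k - 1):
--                 if block[j] > block[j + 1]:
--                     cnt += 1
--             if cnt > 1:
--                 return False
--             if cnt == 1 and block[-1] > block[0]:
--                 return False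
--         return True
--
--     ans = 0
--     for k in range(1, n + 1):
--         if n % k == 0:
--             if check(k):
--                 ans += k
--     return ans
-- ===== SOURCE B (Python) =====
-- def sortableIntegers(nums: list[int]) -> int:
--     n = len(nums)
--     s = sorted(nums)
--
--     def is_rotation(block: list[int], t: list[int]) -> bool:
--         d = t + t
--         k = len(block)
--         return any(d[r:r + k] == block for r in range(k))
--
--     return sum(k for k in range(1, n + 1)
--                if n % k == 0
--                and all(is_rotation(nums[i:i + k], s[i:i + k])
--                        for i in range(0, n, k)))
-- ===== Notes on version B (the rewrite author's own statement) =====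
-- stated objective: alternative
-- what changed: Per block, A compares sorted(block) with the sorted segment and then counts adjacent descents with a wrap test; B instead checks directly that the block is a cyclic rotation of the sorted segment by matching it against the length-k windows of target+target.
import Mathlib
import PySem

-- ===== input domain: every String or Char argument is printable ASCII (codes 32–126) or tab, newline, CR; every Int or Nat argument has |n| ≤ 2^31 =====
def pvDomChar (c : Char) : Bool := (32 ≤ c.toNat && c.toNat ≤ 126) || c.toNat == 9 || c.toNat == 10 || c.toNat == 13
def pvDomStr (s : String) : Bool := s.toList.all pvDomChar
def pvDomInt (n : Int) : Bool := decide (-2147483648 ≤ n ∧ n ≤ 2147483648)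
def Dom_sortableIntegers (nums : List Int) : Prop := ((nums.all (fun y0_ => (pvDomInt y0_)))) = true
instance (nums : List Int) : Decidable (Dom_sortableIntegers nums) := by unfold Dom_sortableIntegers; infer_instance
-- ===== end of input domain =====

-- B replaces A's per-block pair of tests (multiset comparison of sorted(block) with the target
-- segment, plus a linear descent count with a wrap test) by a single direct rotation test: the
-- block must equal some length-k window of target ++ target; objective: alternative (same cost).

-- ===== PORT A =====
-- loop body of A's `check` for one block (the indices pyGetD reads are always in range when
-- `check` is called, since A only calls it with k dividing n, so the default 0 is never used)
def pvBlockA (block target : List Int) (k : Int) : Bool :=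
  if PySem.List.sorted block (fun x => x) false ≠ target then false
  else
    let cnt : Int := (PySem.List.pyRange 0 (k - 1) 1).foldl
      (fun c j => if PySem.List.pyGetD block (j + 1) 0 < PySem.List.pyGetD block j 0 then c + 1 else c) 0
    if 1 < cnt then false
    else if cnt = 1 ∧ PySem.List.pyGetD block 0 0 < PySem.List.pyGetD block (-1) 0 then false
    else true

-- A's `check(k)` (the early-return loop over range(0, n, k) is the `.all`)
def pvCheckA (nums sortedNums : List Int) (n : Nat) (k : Int) : Bool :=
  (PySem.List.pyRange 0 (n : Int) k).all (fun i =>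
    pvBlockA (PySem.List.slice nums (some i) (some (i + k)))
             (PySem.List.slice sortedNums (some i) (some (i + k))) k)

def sortableIntegers (nums : List Int) : Int :=
  let n := nums.length
  let sortedNums := PySem.List.sorted nums (fun x => x) false
  (PySem.List.pyRange 1 ((n : Int) + 1) 1).foldl (fun ans k =>
    if PySem.Int.mod (n : Int) k = 0 then
      if pvCheckA nums sortedNums n k then ans + k else ans
    else ans) 0

-- ===== PORT B =====
-- Source B's `is_rotation(block, t)`: block equals some length-k contiguous window of t + t
def pvIsRotation (block t : List Int) : Bool :=
  let d := t ++ t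
  let k : Int := block.length
  (PySem.List.pyRange 0 k 1).any (fun r =>
    PySem.List.slice d (some r) (some (r + k)) == block)

def sortableIntegers_alt (nums : List Int) : Int :=
  let n := nums.length
  let s := PySem.List.sorted nums (fun x => x) false
  ((PySem.List.pyRange 1 ((n : Int) + 1) 1).filter (fun k =>
      decide (PySem.Int.mod (n : Int) k = 0) &&
      (PySem.List.pyRange 0 (n : Int) k).all (fun i =>
        pvIsRotation (PySem.List.slice nums (some i) (some (i + k)))
                     (PySem.List.slice s (some i) (some (i + k)))))).sum

-- ===== PRECONDITION & SPEC =====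
def Spec_sortableIntegers (nums : List Int) (out : Int) : Prop := out = sortableIntegers_alt nums
instance (nums : List Int) (out : Int) : Decidable (Spec_sortableIntegers nums out) := by unfold Spec_sortableIntegers; infer_instance

-- ===== CLAIM (what is proved, stated in full; the proofs are below) =====
def Claim_equal_sortableIntegers : Prop := ∀ (nums : List Int), Dom_sortableIntegers nums → Spec_sortableIntegers nums (sortableIntegers nums)

-- ===== LEMMAS AND PROOFS =====

-- the rotation of t by r (what a length-|t| window of t ++ t at offset r ≤ |t| is)
def pvRot (t : List Int) (r : Nat) : List Int := t.drop r ++ t.take r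

-- the number of strict descents A's inner loop counts, as a countP
def pvCntA (b : List Int) : Nat :=
  (List.range (b.length - 1)).countP (fun j => decide (b.getD (j + 1) 0 < b.getD j 0))

lemma pv_all_congr {α : Type} (l : List α) (f g : α → Bool)
    (h : ∀ x ∈ l, f x = g x) : l.all f = l.all g := by
  induction l with
  | nil => rfl
  | cons x xs ih =>
    simp only [List.all_cons, h x (by simp), ih (fun y hy => h y (by simp [hy]))]

lemma pv_foldl_if_if (l : List Int) (p : Int → Prop) [DecidablePred p] (q : Int → Bool) (a : Int) :
    l.foldl (fun ans k => if p k then (if q k then ans + k else ans) else ans) a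
      = a + (l.filter (fun k => decide (p k) && q k)).sum := by
  induction l generalizing a with
  | nil => simp
  | cons x xs ih =>
    by_cases hp : p x <;> by_cases hq : q x <;>
      simp [hp, hq, ih, add_assoc]

lemma pv_window (t : List Int) (kn r : Nat) (ht : t.length = kn) (hr : r ≤ kn) :
    PySem.List.slice (t ++ t) (some (r : Int)) (some ((r : Int) + (kn : Int))) = pvRot t r := by
  have : ((r : Int) + (kn : Int)) = ((r + kn : Nat) : Int) := by push_cast; ring
  rw [this, PySem.List.slice_natCast, List.drop_append, List.take_append]
  have h1 : r - t.length = 0 := by omega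
  have h2 : (t.drop r).length = kn - r := by simp [ht]
  rw [h1, List.drop_zero, h2]
  unfold pvRot
  congr 1
  · exact List.take_of_length_le (by omega)
  · congr 1; omega

lemma pvIsRotation_iff (b t : List Int) (kn : Nat) (hb : b.length = kn) (ht : t.length = kn) :
    pvIsRotation b t = true ↔ ∃ r : Nat, r < kn ∧ pvRot t r = b := by
  unfold pvIsRotation
  simp only [hb, List.any_eq_true]
  constructor
  · rintro ⟨r, hr, hp⟩
    rw [PySem.List.mem_pyRange_one] at hr
    obtain ⟨hr0, hrk⟩ := hr
    lift r to ℕ using hr0 with rn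
    refine ⟨rn, by omega, ?_⟩
    rw [beq_iff_eq] at hp
    rw [← hp, ← pv_window t kn rn ht (by omega)]
  · rintro ⟨rn, hrn, hrot⟩
    refine ⟨(rn : Int), ?_, ?_⟩
    · rw [PySem.List.mem_pyRange_one]; omega
    · rw [beq_iff_eq, pv_window t kn rn ht (by omega), hrot]

lemma pv_cnt_eq (b : List Int) (kn : Nat) (hb : b.length = kn) :
    (PySem.List.pyRange 0 ((kn : Int) - 1) 1).foldl
      (fun c j => if PySem.List.pyGetD b (j + 1) 0 < PySem.List.pyGetD b j 0 then c + 1 else c) (0 : Int)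
      = (pvCntA b : Int) := by
  rw [PySem.List.pyRange_one, List.foldl_map]
  rw [PySem.List.foldl_ite_add_one (p := fun j : Nat =>
    PySem.List.pyGetD b ((0 : Int) + (j : Int) + 1) 0 < PySem.List.pyGetD b ((0 : Int) + (j : Int)) 0)]
  rw [zero_add]
  unfold pvCntA
  congr 1
  have h1 : ((kn : Int) - 1 - 0).toNat = b.length - 1 := by omega
  rw [h1]
  refine List.countP_congr ?_
  intro j hj
  have e1 : (0 : Int) + (j : Int) + 1 = ((j + 1 : Nat) : Int) := by push_cast; ring
  have e2 : (0 : Int) + (j : Int) = ((j : Nat) : Int) := by ring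
  rw [e1, e2, PySem.List.pyGetD_natCast, PySem.List.pyGetD_natCast]

lemma pvBlockA_iff (b t : List Int) (kn : Nat) (hk : 0 < kn) (hb : b.length = kn) :
    pvBlockA b t (kn : Int) = true ↔
      (PySem.List.sorted b (fun x => x) false = t ∧ pvCntA b ≤ 1 ∧
        (pvCntA b = 1 → b.getD (kn - 1) 0 ≤ b.getD 0 0)) := by
  have hbne : b ≠ [] := by intro h; rw [h] at hb; simp at hb; omega
  have hlast : PySem.List.pyGetD b (-1) 0 = b.getD (kn - 1) 0 := by
    rw [PySem.List.pyGetD_neg_one b 0 hbne, List.getLast_eq_getElem,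
        List.getD_eq_getElem b 0 (by omega)]
    congr 1; omega
  have hzero : PySem.List.pyGetD b 0 0 = b.getD 0 0 := PySem.List.pyGetD_zero b 0
  unfold pvBlockA
  simp only [pv_cnt_eq b kn hb, hlast, hzero]
  by_cases hs : PySem.List.sorted b (fun x => x) false = t
  · simp only [hs, ne_eq, not_true_eq_false, if_false, true_and]
    split_ifs with h1 h2
    · simp only [false_iff]
      intro ⟨hc, _⟩; omega
    · simp only [false_iff]
      intro ⟨hc, himp⟩
      obtain ⟨hc1, hlt⟩ := h2
      have : pvCntA b = 1 := by omega
      have := himp this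
      omega
    · simp only [true_iff]
      rw [not_and] at h2
      constructor
      · omega
      · intro hc1
        have := h2 (by omega)
        omega
  · simp [hs]

lemma pv_mono (b : List Int) (lo hi : Nat)
    (h : ∀ j, lo ≤ j → j + 1 < hi → b.getD j 0 ≤ b.getD (j + 1) 0) :
    ∀ p q, lo ≤ p → p ≤ q → q < hi → b.getD p 0 ≤ b.getD q 0 := by
  intro p q hp hpq hq
  induction q, hpq using Nat.le_induction with
  | base => exact le_refl _
  | succ m hm ih =>
    exact le_trans (ih (by omega)) (h m (by omega) (by omega))

lemma pv_cnt_zero_iff (b : List Int) :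
    pvCntA b = 0 ↔ ∀ j, j + 1 < b.length → ¬ (b.getD (j + 1) 0 < b.getD j 0) := by
  unfold pvCntA
  rw [List.countP_eq_zero]
  constructor
  · intro h j hj
    have := h j (by rw [List.mem_range]; omega)
    simpa using this
  · intro h j hj
    rw [List.mem_range] at hj
    simpa using h j (by omega)

lemma pv_cnt_one (b : List Int) (hc : pvCntA b = 1) :
    ∃ j0, j0 + 1 < b.length ∧ (b.getD (j0 + 1) 0 < b.getD j0 0) ∧
      ∀ j, j + 1 < b.length → j ≠ j0 → ¬ (b.getD (j + 1) 0 < b.getD j 0) := by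
  unfold pvCntA at hc
  rw [List.countP_eq_length_filter, List.length_eq_one_iff] at hc
  obtain ⟨j0, hj0⟩ := hc
  have hmem : j0 ∈ (List.range (b.length - 1)).filter
      (fun j => decide (b.getD (j + 1) 0 < b.getD j 0)) := by rw [hj0]; simp
  rw [List.mem_filter, List.mem_range] at hmem
  refine ⟨j0, by omega, by simpa using hmem.2, ?_⟩
  intro j hj hne hdesc
  have : j ∈ (List.range (b.length - 1)).filter
      (fun j => decide (b.getD (j + 1) 0 < b.getD j 0)) := by
    rw [List.mem_filter, List.mem_range]
    exact ⟨by omega, by simpa using hdesc⟩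
  rw [hj0, List.mem_singleton] at this
  exact hne this

lemma pv_cnt_le_one (b : List Int) (jr : Nat)
    (h : ∀ j, j + 1 < b.length → j ≠ jr → ¬ (b.getD (j + 1) 0 < b.getD j 0)) :
    pvCntA b ≤ 1 := by
  unfold pvCntA
  calc (List.range (b.length - 1)).countP (fun j => decide (b.getD (j + 1) 0 < b.getD j 0))
      ≤ (List.range (b.length - 1)).countP (fun j => j == jr) := by
        refine List.countP_mono_left ?_
        intro j hj hp
        rw [List.mem_range] at hj
        by_contra hne
        exact h j (by omega) (by simpa using hne) (by simpa using hp)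
    _ = (List.range (b.length - 1)).count jr := rfl
    _ ≤ 1 := List.nodup_iff_count_le_one.mp (List.nodup_range) jr

lemma pv_rot_length (t : List Int) (r : Nat) (hr : r ≤ t.length) :
    (pvRot t r).length = t.length := by
  unfold pvRot; simp; omega

lemma pv_rot_perm (t : List Int) (r : Nat) : (pvRot t r).Perm t := by
  unfold pvRot
  exact (List.perm_append_comm).trans (by rw [List.take_append_drop])

lemma pv_rot_getD (t : List Int) (kn r j : Nat) (ht : t.length = kn) (hr : r ≤ kn) (hj : j < kn) :
    (pvRot t r).getD j 0 = if j < kn - r then t.getD (r + j) 0 else t.getD (j - (kn - r)) 0 := by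
  have hlen : (pvRot t r).length = kn := by rw [pv_rot_length t r (by omega)]; omega
  have hdl : (t.drop r).length = kn - r := by simp [ht]
  rw [List.getD_eq_getElem _ 0 (by omega)]
  unfold pvRot
  rw [List.getElem_append]
  split
  · rename_i h
    rw [hdl] at h
    rw [if_pos h, List.getElem_drop, List.getD_eq_getElem _ 0 (by omega)]
  · rename_i h
    rw [hdl] at h
    rw [if_neg h, List.getElem_take, List.getD_eq_getElem _ 0 (by omega)]
    congr 1
    omega

lemma pv_pairwise_getD_iff (b : List Int) :
    b.Pairwise (· ≤ ·) ↔ ∀ p q, p < q → q < b.length → b.getD p 0 ≤ b.getD q 0 := by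
  rw [List.pairwise_iff_getElem]
  constructor
  · intro h p q hpq hq
    rw [List.getD_eq_getElem _ 0 (by omega), List.getD_eq_getElem _ 0 hq]
    exact h p q (by omega) hq hpq
  · intro h i j hi hj hij
    have := h i j hij hj
    rw [List.getD_eq_getElem _ 0 hi, List.getD_eq_getElem _ 0 hj] at this
    exact this

lemma pv_rot_props (t : List Int) (kn r : Nat) (hk : 0 < kn) (ht : t.length = kn)
    (hr : r < kn) (hts : t.Pairwise (· ≤ ·)) :
    PySem.List.sorted (pvRot t r) (fun x => x) false = t ∧ pvCntA (pvRot t r) ≤ 1 ∧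
      (pvCntA (pvRot t r) = 1 → (pvRot t r).getD (kn - 1) 0 ≤ (pvRot t r).getD 0 0) := by
  set b := pvRot t r with hbdef
  have hlen : b.length = kn := by rw [hbdef, pv_rot_length t r (by omega)]; omega
  have htm : ∀ p q, p ≤ q → q < kn → t.getD p 0 ≤ t.getD q 0 := by
    intro p q hpq hq
    rcases Nat.lt_or_ge p q with h | h
    · exact (pv_pairwise_getD_iff t).mp hts p q h (by omega)
    · have : p = q := by omega
      rw [this]
  have hget : ∀ j, j < kn → b.getD j 0 = if j < kn - r then t.getD (r + j) 0 else t.getD (j - (kn - r)) 0 :=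
    fun j hj => pv_rot_getD t kn r j ht (by omega) hj
  have hnodesc : ∀ j, j + 1 < kn → j ≠ kn - r - 1 → ¬ (b.getD (j + 1) 0 < b.getD j 0) := by
    intro j hj hne
    rw [hget j (by omega), hget (j + 1) (by omega)]
    rcases Nat.lt_or_ge (j + 1) (kn - r) with h | h
    · rw [if_pos h, if_pos (show j < kn - r by omega)]
      exact not_lt.mpr (htm (r + j) (r + (j + 1)) (by omega) (by omega))
    · have hjge : kn - r ≤ j := by omega
      rw [if_neg (show ¬ (j + 1 < kn - r) by omega), if_neg (show ¬ (j < kn - r) by omega)]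
      exact not_lt.mpr (htm (j - (kn - r)) (j + 1 - (kn - r)) (by omega) (by omega))
  refine ⟨?_, ?_, ?_⟩
  · exact PySem.List.sorted_id_eq_of_perm_of_pairwise b t (pv_rot_perm t r).symm hts
  · exact pv_cnt_le_one b (kn - r - 1) (by rw [hlen]; exact hnodesc)
  · intro hc1
    by_cases hr0 : r = 0
    · exfalso
      have : pvCntA b = 0 := by
        rw [pv_cnt_zero_iff, hlen]
        intro j hj
        exact hnodesc j hj (by omega)
      omega
    · rw [hget (kn - 1) (by omega), hget 0 (by omega)]
      rw [if_neg (show ¬ (kn - 1 < kn - r) by omega), if_pos (show 0 < kn - r by omega)]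
      have e1 : kn - 1 - (kn - r) = r - 1 := by omega
      have e2 : r + 0 = r := by omega
      rw [e1, e2]
      exact htm (r - 1) r (by omega) (by omega)

lemma pv_props_rot (b t : List Int) (kn : Nat) (hk : 0 < kn) (hb : b.length = kn)
    (ht : t.length = kn)
    (h1 : PySem.List.sorted b (fun x => x) false = t) (h2 : pvCntA b ≤ 1)
    (h3 : pvCntA b = 1 → b.getD (kn - 1) 0 ≤ b.getD 0 0) :
    ∃ r : Nat, r < kn ∧ pvRot t r = b := by
  rcases Nat.lt_or_ge (pvCntA b) 1 with hc | hc
  · -- cnt = 0 : b is sorted, so t = b and r = 0 works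
    have hc0 : pvCntA b = 0 := by omega
    have hmono := pv_mono b 0 kn (by
      intro j _ hj
      have := (pv_cnt_zero_iff b).mp hc0 j (by omega)
      omega)
    have hpw : b.Pairwise (· ≤ ·) := by
      rw [pv_pairwise_getD_iff]
      intro p q hpq hq
      exact hmono p q (by omega) (by omega) (by omega)
    have hsb : PySem.List.sorted b (fun x => x) false = b :=
      PySem.List.sorted_id_eq_of_perm_of_pairwise b b (List.Perm.refl b) hpw
    refine ⟨0, by omega, ?_⟩
    rw [← h1, hsb]
    unfold pvRot
    simp
  · -- cnt = 1 : rotate b at its unique descent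
    have hc1 : pvCntA b = 1 := by omega
    obtain ⟨j0, hj0lt, hdesc, huniq⟩ := pv_cnt_one b hc1
    rw [hb] at hj0lt huniq
    set r' := j0 + 1 with hr'def
    have hlast := h3 hc1
    have hmono1 := pv_mono b r' kn (by
      intro j hjlo hj
      have := huniq j (by omega) (by omega)
      omega)
    have hmono2 := pv_mono b 0 r' (by
      intro j _ hj
      have := huniq j (by omega) (by omega)
      omega)
    set rot := b.drop r' ++ b.take r' with hrotdef
    have hdl : (b.drop r').length = kn - r' := by simp [hb]
    have hrotlen : rot.length = kn := by rw [hrotdef]; simp [hb]; omega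
    have hrotget : ∀ j, j < kn → rot.getD j 0 =
        if j < kn - r' then b.getD (r' + j) 0 else b.getD (j - (kn - r')) 0 := by
      intro j hj
      exact pv_rot_getD b kn r' j hb (by omega) hj
    have hrotpw : rot.Pairwise (· ≤ ·) := by
      rw [pv_pairwise_getD_iff]
      intro p q hpq hq
      rw [hrotlen] at hq
      rw [hrotget p (by omega), hrotget q (by omega)]
      rcases Nat.lt_or_ge q (kn - r') with hq1 | hq1
      · rw [if_pos (show p < kn - r' by omega), if_pos hq1]
        exact hmono1 (r' + p) (r' + q) (by omega) (by omega) (by omega)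
      · rcases Nat.lt_or_ge p (kn - r') with hp1 | hp1
        · rw [if_pos hp1, if_neg (show ¬ (q < kn - r') by omega)]
          calc b.getD (r' + p) 0 ≤ b.getD (kn - 1) 0 :=
                hmono1 (r' + p) (kn - 1) (by omega) (by omega) (by omega)
            _ ≤ b.getD 0 0 := hlast
            _ ≤ b.getD (q - (kn - r')) 0 := hmono2 0 (q - (kn - r')) (by omega) (by omega) (by omega)
        · rw [if_neg (show ¬ (p < kn - r') by omega), if_neg (show ¬ (q < kn - r') by omega)]
          exact hmono2 (p - (kn - r')) (q - (kn - r')) (by omega) (by omega) (by omega)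
    have hteq : t = rot := by
      rw [← h1]
      exact PySem.List.sorted_id_eq_of_perm_of_pairwise b rot (pv_rot_perm b r') hrotpw
    refine ⟨kn - r', by omega, ?_⟩
    unfold pvRot
    rw [hteq, hrotdef, ← hdl, List.drop_left, List.take_left]
    exact List.take_append_drop r' b

lemma pv_block_eq (b t : List Int) (kn : Nat) (hk : 0 < kn) (hb : b.length = kn)
    (ht : t.length = kn) (hts : t.Pairwise (· ≤ ·)) :
    pvBlockA b t (kn : Int) = pvIsRotation b t := by
  rw [Bool.eq_iff_iff, pvBlockA_iff b t kn hk hb, pvIsRotation_iff b t kn hb ht]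
  constructor
  · rintro ⟨h1, h2, h3⟩
    exact pv_props_rot b t kn hk hb ht h1 h2 h3
  · rintro ⟨r, hr, hrot⟩
    subst hrot
    exact pv_rot_props t kn r hk ht hr hts

lemma pv_perk (nums : List Int) (k : Int) (hk1 : 1 ≤ k)
    (hdvd : k ∣ (nums.length : Int)) :
    pvCheckA nums (PySem.List.sorted nums (fun x => x) false) nums.length k
      = (PySem.List.pyRange 0 (nums.length : Int) k).all (fun i =>
          pvIsRotation (PySem.List.slice nums (some i) (some (i + k)))
                       (PySem.List.slice (PySem.List.sorted nums (fun x => x) false) (some i) (some (i + k)))) := by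
  set s := PySem.List.sorted nums (fun x => x) false with hsdef
  have hslen : s.length = nums.length := PySem.List.length_sorted nums _ _
  unfold pvCheckA
  refine pv_all_congr _ _ _ ?_
  intro i hi
  rw [PySem.List.mem_pyRange_iff_of_pos (by omega)] at hi
  obtain ⟨hi0, hin, hdvdi⟩ := hi
  -- i and k divide evenly, so the block runs to i + k ≤ n
  have hik : i + k ≤ (nums.length : Int) := by
    obtain ⟨a, ha⟩ : k ∣ i := by simpa using hdvdi
    obtain ⟨bq, hbq⟩ := hdvd
    have hab : a < bq := by
      by_contra hge
      rw [not_lt] at hge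
      have : k * bq ≤ k * a := by
        exact mul_le_mul_of_nonneg_left hge (by omega)
      omega
    have : k * (a + 1) ≤ k * bq := by
      exact mul_le_mul_of_nonneg_left (by omega) (by omega)
    calc i + k = k * (a + 1) := by rw [ha]; ring
      _ ≤ k * bq := this
      _ = (nums.length : Int) := hbq.symm
  lift i to ℕ using hi0 with iN
  lift k to ℕ using (by omega : (0:Int) ≤ k) with kN
  have hcast : (iN : Int) + (kN : Int) = ((iN + kN : Nat) : Int) := by push_cast; ring
  have hblock : PySem.List.slice nums (some (iN : Int)) (some ((iN : Int) + (kN : Int)))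
      = (nums.drop iN).take kN := by
    rw [hcast, PySem.List.slice_natCast]
    congr 1
    omega
  have htarget : PySem.List.slice s (some (iN : Int)) (some ((iN : Int) + (kN : Int)))
      = (s.drop iN).take kN := by
    rw [hcast, PySem.List.slice_natCast]
    congr 1
    omega
  have hblen : ((nums.drop iN).take kN).length = kN := by
    simp
    omega
  have htlen : ((s.drop iN).take kN).length = kN := by
    simp [hslen]
    omega
  have htpw : ((s.drop iN).take kN).Pairwise (· ≤ ·) := by
    have hsub : ((s.drop iN).take kN).Sublist s :=
      (List.take_sublist _ _).trans (List.drop_sublist _ _)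
    exact List.Pairwise.sublist hsub (PySem.List.sorted_pairwise nums (fun x => x))
  rw [hblock, htarget]
  exact pv_block_eq _ _ kN (by omega) hblen htlen htpw

-- ===== VERDICT (by name: the statement is the Claim_ definition above) =====
theorem sortableIntegers_spec : Claim_equal_sortableIntegers := by
  intro nums _
  unfold Spec_sortableIntegers sortableIntegers sortableIntegers_alt
  rw [pv_foldl_if_if _ (fun k => PySem.Int.mod (nums.length : Int) k = 0)
        (fun k => pvCheckA nums (PySem.List.sorted nums (fun x => x) false) nums.length k) 0,
      zero_add]
  congr 1
  refine List.filter_congr ?_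
  intro k hk
  rw [PySem.List.mem_pyRange_one] at hk
  by_cases hm : PySem.Int.mod (nums.length : Int) k = 0
  · have hdvd : k ∣ (nums.length : Int) := (PySem.Int.mod_eq_zero_iff_dvd _ _).mp hm
    simp only [hm, decide_true, Bool.true_and]
    exact pv_perk nums k (by omega) hdvd
  · simp [hm]
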